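-- pv_equiv track=rewrite | github.com/teamWSIZ/pti-python1 | etap3/zadanie_C_test.py | good_span
-- ===== SOURCE A (Python) =====
-- def good_span(lista, span):
--     # `lista` -- to jest lista liczb całkowitych
--     # `span` to liczba całkowita...
--     liczba_max = lista[0]
--     for l in lista:
--         if l > liczba_max:
--             liczba_max = l
--     # tutaj liczba_max to największa liczba w liście `lista`
--     liczba_min = lista[0]
--     for l in lista:
--         if l < liczba_min:
--             liczba_min = l
--     # tutaj liczba_min to najminiejsza liczba w liście `lista`
--     if liczba_max - liczba_min <= span:
--         return True
--     else:
--         return False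
-- ===== SOURCE B (Python) =====
-- def good_span(lista, span):
--     s = sorted(lista)
--     return s[-1] - s[0] <= span
-- ===== Notes on version B (the rewrite author's own statement) =====
-- stated objective: alternative
-- what changed: Replaces A's two explicit max/min scan loops with sorting the list once and comparing its last and first elements; no scan loops remain in B.
import Mathlib
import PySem

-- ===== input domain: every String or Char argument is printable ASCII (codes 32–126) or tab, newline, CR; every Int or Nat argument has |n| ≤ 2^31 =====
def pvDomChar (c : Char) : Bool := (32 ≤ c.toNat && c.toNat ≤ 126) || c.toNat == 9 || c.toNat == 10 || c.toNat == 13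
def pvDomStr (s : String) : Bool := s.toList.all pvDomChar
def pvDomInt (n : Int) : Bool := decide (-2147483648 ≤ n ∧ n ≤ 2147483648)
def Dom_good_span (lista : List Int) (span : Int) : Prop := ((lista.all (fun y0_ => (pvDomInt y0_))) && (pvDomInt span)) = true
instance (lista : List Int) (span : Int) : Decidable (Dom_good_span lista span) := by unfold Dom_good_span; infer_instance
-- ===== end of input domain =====

-- B replaces A's two max/min scan loops by sorting once and comparing last-first (alternative algorithm).

-- ===== PORT A =====
def good_span (lista : List Int) (span : Int) : Bool :=
  match lista.head? with
  | none => false  -- unreachable: Pre_good_span excludes [], where Python A raises IndexError at lista[0]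
  | some h0 =>
      let liczba_max := lista.foldl (fun m l => if l > m then l else m) h0
      let liczba_min := lista.foldl (fun m l => if l < m then l else m) h0
      if liczba_max - liczba_min ≤ span then true else false

-- ===== PORT B =====
def good_span_alt (lista : List Int) (span : Int) : Bool :=
  let s := PySem.List.sorted lista (fun x => x) false
  match PySem.List.pyGet? s (-1), PySem.List.pyGet? s 0 with
  | some last, some first => decide (last - first ≤ span)
  | _, _ => false  -- unreachable: Pre_good_span excludes [], where Python B raises IndexError at s[-1]

-- ===== PRECONDITION & SPEC =====
-- Pre_ excludes only the empty list, on which both Pythons raise IndexError.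
def Pre_good_span (lista : List Int) (span : Int) : Prop := lista ≠ []
instance (lista : List Int) (span : Int) : Decidable (Pre_good_span lista span) := by unfold Pre_good_span; infer_instance
def pvWitness_good_span : List Int × Int := ([3, -1, 4], 6)

def Spec_good_span (lista : List Int) (span : Int) (out : Bool) : Prop := out = good_span_alt lista span
instance (lista : List Int) (span : Int) (out : Bool) : Decidable (Spec_good_span lista span out) := by unfold Spec_good_span; infer_instance

-- ===== CLAIM =====
def Claim_equal_good_span : Prop := ∀ (lista : List Int) (span : Int), Dom_good_span lista span → Pre_good_span lista span → Spec_good_span lista span (good_span lista span)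

-- ===== LEMMAS AND PROOFS =====

theorem cond_eq_max (m l : Int) : (if l > m then l else m) = max m l := by
  rcases le_or_gt l m with h | h
  · simp [max_eq_left h, not_lt.mpr h]
  · simp [max_eq_right h.le, h]

theorem cond_eq_min (m l : Int) : (if l < m then l else m) = min m l := by
  rcases le_or_gt m l with h | h
  · simp [min_eq_left h, not_lt.mpr h]
  · simp [min_eq_right h.le, h]

theorem foldl_max_mem (t : List Int) (a : Int) :
    t.foldl max a = a ∨ t.foldl max a ∈ t := by
  induction t generalizing a with
  | nil => exact Or.inl rfl
  | cons x xs ih =>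
      rcases ih (max a x) with h | h
      · rcases max_choice a x with hm | hm
        · exact Or.inl (by simpa [hm] using h)
        · exact Or.inr (by simp [List.foldl, h.trans hm])
      · exact Or.inr (List.mem_cons_of_mem _ h)

theorem foldl_min_facts (t : List Int) (a : Int) :
    (t.foldl min a ≤ a ∧ ∀ y ∈ t, t.foldl min a ≤ y) ∧
      (t.foldl min a = a ∨ t.foldl min a ∈ t) := by
  induction t generalizing a with
  | nil => exact ⟨⟨le_refl a, by simp⟩, Or.inl rfl⟩
  | cons x xs ih =>
      obtain ⟨⟨hle, hall⟩, hmem⟩ := ih (min a x)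
      refine ⟨⟨hle.trans (min_le_left a x), ?_⟩, ?_⟩
      · intro y hy
        rcases List.mem_cons.mp hy with rfl | hy
        · exact hle.trans (min_le_right a y)
        · exact hall y hy
      · rcases hmem with h | h
        · rcases min_choice a x with hm | hm
          · exact Or.inl (by simpa [hm] using h)
          · exact Or.inr (by simp [List.foldl, h.trans hm])
        · exact Or.inr (List.mem_cons_of_mem _ h)

theorem pairwise_le_getLast (l : List Int) (hne : l ≠ []) (hp : l.Pairwise (· ≤ ·)) :
    ∀ x ∈ l, x ≤ l.getLast hne := by
  induction l with
  | nil => exact absurd rfl hne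
  | cons a t ih =>
      intro x hx
      cases t with
      | nil => simp_all
      | cons b u =>
          rcases List.mem_cons.mp hx with rfl | hx
          · rw [List.getLast_cons (by simp)]
            exact (List.rel_of_pairwise_cons hp (List.getLast_mem _)).trans (le_refl _)
          · rw [List.getLast_cons (by simp)]
            exact ih (by simp) hp.of_cons x hx

-- ===== VERDICT =====
theorem good_span_spec : Claim_equal_good_span := by
  intro lista span _ hpre
  unfold Spec_good_span good_span good_span_alt
  cases lista with
  | nil => exact absurd rfl hpre
  | cons h t =>
  simp only [List.head?]
  -- B side: the sorted list and its first/last elements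
  have hsne : PySem.List.sorted (h :: t) (fun x => x) false ≠ [] := by
    simp [PySem.List.sorted_eq_nil_iff]
  obtain ⟨m, t', hst⟩ := List.exists_cons_of_ne_nil hsne
  have hget0 : PySem.List.pyGet? (PySem.List.sorted (h :: t) (fun x => x) false) 0 = some m := by
    rw [hst]; exact PySem.List.pyGet?_zero_cons _ _
  have hlast : PySem.List.pyGet? (PySem.List.sorted (h :: t) (fun x => x) false) (-1)
      = some ((PySem.List.sorted (h :: t) (fun x => x) false).getLast hsne) := by
    rw [PySem.List.pyGet?_neg_one, List.getLast?_eq_some_getLast]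
  set L := (PySem.List.sorted (h :: t) (fun x => x) false).getLast hsne
  have hLmem : L ∈ h :: t :=
    (PySem.List.mem_sorted _ _ _ _).mp (List.getLast_mem hsne)
  have hLmax : ∀ y ∈ h :: t, y ≤ L := by
    intro y hy
    exact pairwise_le_getLast _ hsne (PySem.List.sorted_pairwise (h :: t) (fun x => x)) y
      ((PySem.List.mem_sorted _ _ _ _).mpr hy)
  have hmmem : m ∈ h :: t := by
    rw [← PySem.List.mem_sorted (h :: t) (fun x => x) false, hst]; exact List.mem_cons_self
  have hmmin : ∀ y ∈ h :: t, m ≤ y := PySem.List.key_head_sorted_le (h :: t) (fun x => x) hst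
  -- A side: the two fold loops compute foldl max / foldl min
  have hfx : (fun (m l : Int) => if l > m then l else m) = max := by
    funext a b; exact cond_eq_max a b
  have hfn : (fun (m l : Int) => if l < m then l else m) = min := by
    funext a b; exact cond_eq_min a b
  rw [hfx, hfn, hget0, hlast]
  have hfoldmax : (h :: t).foldl max h = List.foldl max h t := by
    simp [List.foldl]
  have hfoldmin : (h :: t).foldl min h = List.foldl min h t := by
    simp [List.foldl]
  obtain ⟨hini, hall⟩ := PySem.List.le_foldl_max t h
  obtain ⟨⟨hmini, hmall⟩, hmmem'⟩ := foldl_min_facts t h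
  -- foldl max h t = L
  have hmaxeq : List.foldl max h t = L := by
    refine le_antisymm (hLmax _ ?_) ?_
    · rcases foldl_max_mem t h with he | he
      · rw [he]; exact List.mem_cons_self
      · exact List.mem_cons_of_mem _ he
    · rcases List.mem_cons.mp hLmem with he | hy
      · rw [he]; exact hini
      · exact hall _ hy
  -- foldl min h t = m
  have hmineq : List.foldl min h t = m := by
    refine le_antisymm ?_ (hmmin _ ?_)
    · rcases List.mem_cons.mp hmmem with he | hy
      · rw [he]; exact hmini
      · exact hmall _ hy
    · rcases hmmem' with he | he
      · rw [he]; exact List.mem_cons_self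
      · exact List.mem_cons_of_mem _ he
  rw [hfoldmax, hfoldmin, hmaxeq, hmineq]
  by_cases hsp : L - m ≤ span <;> simp [hsp]
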